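-- pv_equiv track=rewrite | github.com/fabiotapro/greed | greed/test-space/reverse_call_graph_transfer.py | get_relevant_functions
-- ===== SOURCE A (Python) =====
-- def get_relevant_functions(function_callers, transfer_callers):
--     """
--     Recursively finds all function callers for the transfer callers.
--     """
--     relevant_functions = set()
--
--     def recurse(func):
--         if func in relevant_functions:
--             return  # Avoid revisiting
--         relevant_functions.add(func)
--         callers = function_callers.get(func, [])
--         for caller in callers:
--             recurse(caller)
--
--     for function in transfer_callers:
--         recurse(function)
--
--     return relevant_functions
-- ===== SOURCE B (Python) =====
-- def get_relevant_functions(function_callers, transfer_callers):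
--     """
--     Iteratively finds all function callers for the transfer callers
--     using an explicit DFS stack instead of recursion.
--     """
--     relevant_functions = set()
--     stack = list(reversed(transfer_callers))
--     while stack:
--         func = stack.pop()
--         if func not in relevant_functions:
--             relevant_functions.add(func)
--             stack.extend(reversed(function_callers.get(func, [])))
--     return relevant_functions
-- ===== Notes on version B (the rewrite author's own statement) =====
-- stated objective: alternative
-- what changed: The recursive DFS with a nested closure is replaced by an iterative worklist loop over an explicit stack (pop a function, skip if seen, otherwise mark it and push its callers); no recursion and no inner function remain, and deep caller chains no longer risk Python's recursion limit.
import Mathlib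
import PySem

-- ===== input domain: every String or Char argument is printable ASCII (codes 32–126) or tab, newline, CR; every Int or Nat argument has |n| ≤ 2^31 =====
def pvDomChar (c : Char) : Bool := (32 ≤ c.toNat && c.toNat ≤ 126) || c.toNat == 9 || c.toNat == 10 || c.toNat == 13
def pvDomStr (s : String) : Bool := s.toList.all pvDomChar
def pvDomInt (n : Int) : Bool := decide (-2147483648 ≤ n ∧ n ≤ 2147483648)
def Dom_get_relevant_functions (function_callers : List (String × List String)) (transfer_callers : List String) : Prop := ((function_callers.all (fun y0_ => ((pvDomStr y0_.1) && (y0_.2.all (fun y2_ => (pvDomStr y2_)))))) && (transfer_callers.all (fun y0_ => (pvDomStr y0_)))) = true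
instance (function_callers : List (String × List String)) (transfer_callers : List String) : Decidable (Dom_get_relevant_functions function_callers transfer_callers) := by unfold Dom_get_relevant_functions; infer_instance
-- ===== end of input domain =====

-- B replaces A's recursive DFS (nested closure) by an iterative explicit-stack worklist loop; same cost,
-- no recursion.  Both return a Python set; the ports build it in identical first-insertion order.

-- ===== PORT A =====
-- Helper lemmas cited by loopB's decreasing_by (the B port's termination); nothing else uses them above the claim.
theorem mem_getD_flatMap (fc : List (String × List String)) (k x : String)
    (h : x ∈ (PySem.Dict.mk fc).getD k []) : x ∈ fc.flatMap Prod.snd := by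
  induction fc with
  | nil => simp [PySem.Dict.getD, PySem.Dict.get?] at h
  | cons p rest ih =>
    obtain ⟨a, b⟩ := p
    rw [PySem.Dict.getD_eq_get?_getD, PySem.Dict.get?_mk_cons] at h
    by_cases hk : (a == k) = true
    · simp [hk] at h
      exact List.mem_flatMap.mpr ⟨(a, b), List.mem_cons_self, h⟩
    · simp only [hk, Bool.false_eq_true, if_false] at h
      rw [← PySem.Dict.getD_eq_get?_getD] at h
      simp only [List.flatMap_cons]
      exact List.mem_append_right _ (ih h)

theorem length_getD_le (fc : List (String × List String)) (k : String) :
    ((PySem.Dict.mk fc).getD k []).length ≤ (fc.flatMap Prod.snd).length := by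
  induction fc with
  | nil => simp [PySem.Dict.getD, PySem.Dict.get?]
  | cons p rest ih =>
    obtain ⟨a, b⟩ := p
    rw [PySem.Dict.getD_eq_get?_getD, PySem.Dict.get?_mk_cons]
    by_cases hk : (a == k) = true
    · simp [hk]
    · simp only [hk, Bool.false_eq_true, if_false]
      rw [← PySem.Dict.getD_eq_get?_getD]
      simp only [List.flatMap_cons, List.length_append]
      omega

-- A's inner 'def recurse(func)'.  Fuel is a totality guard only: get_relevant_functions passes
-- fuel larger than the number of distinct reachable names, so the 0-branch is never taken
-- (the proofs below establish this); each level transcribes A's body step for step.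
def recurseA (fc : List (String × List String)) : Nat → PySem.Set String → String → PySem.Set String
  | 0, visited, _ => visited
  | fuel + 1, visited, func =>
    if PySem.Set.contains visited func then visited            -- if func in relevant_functions: return
    else
      -- relevant_functions.add(func); callers = function_callers.get(func, []); for caller in callers: recurse(caller)
      ((PySem.Dict.mk fc).getD func []).foldl
        (fun v c => recurseA fc fuel v c) (PySem.Set.add visited func)

def get_relevant_functions (function_callers : List (String × List String)) (transfer_callers : List String) : List String :=
  -- for function in transfer_callers: recurse(function)
  transfer_callers.foldl
    (fun v f => recurseA function_callers ((transfer_callers ++ function_callers.flatMap Prod.snd).length + 1) v f)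
    PySem.Set.empty

-- ===== PORT B =====
-- The while loop.  Source B's stack has its top at the END (list(reversed(tc)) + pop()); the port keeps the
-- top at the HEAD, which pops the very same elements in the same order; stack.extend(reversed(callers))
-- is then 'callers ++ rest'.
def loopB (fc : List (String × List String)) (visited : PySem.Set String) (stack : List String) : PySem.Set String :=
  match stack with
  | [] => visited
  | func :: rest =>
    if PySem.Set.contains visited func then loopB fc visited rest
    else loopB fc (PySem.Set.add visited func) ((PySem.Dict.mk fc).getD func [] ++ rest)
termination_by
  (((stack ++ fc.flatMap Prod.snd).toFinset.filter (fun x => x ∉ visited)).card)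
    * ((fc.flatMap Prod.snd).length + 1) + stack.length
decreasing_by
  · -- skip case: universe shrinks (or stays), stack shorter
    have hsub : ((rest ++ fc.flatMap Prod.snd).toFinset.filter (fun x => x ∉ visited)).card
        ≤ (((func :: rest) ++ fc.flatMap Prod.snd).toFinset.filter (fun x => x ∉ visited)).card := by
      apply Finset.card_le_card
      apply Finset.filter_subset_filter
      intro x hx
      simp only [List.mem_toFinset, List.cons_append, List.mem_cons] at *
      tauto
    have hmul := Nat.mul_le_mul_right ((fc.flatMap Prod.snd).length + 1) hsub
    simp only [List.length_cons]
    omega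
  · -- visit case: at least one unvisited universe element disappears
    rename_i hfunc
    have hss : ((((PySem.Dict.mk fc).getD func [] ++ rest) ++ fc.flatMap Prod.snd).toFinset.filter
          (fun x => x ∉ PySem.Set.add visited func)).card
        < (((func :: rest) ++ fc.flatMap Prod.snd).toFinset.filter (fun x => x ∉ visited)).card := by
      apply Finset.card_lt_card
      constructor
      · intro x hx
        simp only [Finset.mem_filter, List.mem_toFinset, List.append_assoc, List.mem_append,
          List.cons_append, List.mem_cons] at *
        obtain ⟨hx1, hx2⟩ := hx
        refine ⟨?_, fun hv => hx2 ((PySem.Set.mem_add visited func x).mpr (Or.inl hv))⟩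
        rcases hx1 with h | h | h
        · exact Or.inr (Or.inr (mem_getD_flatMap fc func x h))
        · exact Or.inr (Or.inl h)
        · exact Or.inr (Or.inr h)
      · intro hsub
        have h1 : func ∈ (((func :: rest) ++ fc.flatMap Prod.snd).toFinset.filter (fun x => x ∉ visited)) :=
          Finset.mem_filter.mpr ⟨List.mem_toFinset.mpr (by simp),
            fun hv => hfunc (List.contains_iff_mem.mpr hv)⟩
        have h2 := hsub h1
        simp only [Finset.mem_filter] at h2
        exact h2.2 ((PySem.Set.mem_add visited func func).mpr (Or.inr rfl))
    have hlen := length_getD_le fc func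
    have hmul := Nat.mul_le_mul_right ((fc.flatMap Prod.snd).length + 1) (Nat.succ_le_of_lt hss)
    simp only [Nat.succ_mul] at hmul
    simp only [List.length_append, List.length_cons]
    omega

def get_relevant_functions_alt (function_callers : List (String × List String)) (transfer_callers : List String) : List String :=
  loopB function_callers PySem.Set.empty transfer_callers

-- ===== PRECONDITION & SPEC =====
def Spec_get_relevant_functions (function_callers : List (String × List String)) (transfer_callers : List String) (out : List String) : Prop := out = get_relevant_functions_alt function_callers transfer_callers
instance (function_callers : List (String × List String)) (transfer_callers : List String) (out : List String) : Decidable (Spec_get_relevant_functions function_callers transfer_callers out) := by unfold Spec_get_relevant_functions; infer_instance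

-- ===== CLAIM (what is proved, stated in full; the proofs are below) =====
def Claim_equal_get_relevant_functions : Prop := ∀ (function_callers : List (String × List String)) (transfer_callers : List String), Dom_get_relevant_functions function_callers transfer_callers → Spec_get_relevant_functions function_callers transfer_callers (get_relevant_functions function_callers transfer_callers)

-- ===== LEMMAS AND PROOFS =====

-- number of elements of U not yet visited: the fuel bound A's proof runs on
def cnt (U : Finset String) (v : List String) : Nat := (U.filter (fun x => x ∉ v)).card

theorem cnt_mono (U : Finset String) (v w : List String) (h : ∀ x ∈ v, x ∈ w) :
    cnt U w ≤ cnt U v := by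
  apply Finset.card_le_card
  intro x hx
  simp only [Finset.mem_filter] at *
  exact ⟨hx.1, fun hv => hx.2 (h x hv)⟩

theorem cnt_add_lt (U : Finset String) (v : List String) (f : String)
    (h1 : f ∈ U) (h2 : f ∉ v) : cnt U (PySem.Set.add v f) < cnt U v := by
  apply Finset.card_lt_card
  constructor
  · intro x hx
    simp only [Finset.mem_filter] at *
    exact ⟨hx.1, fun hv => hx.2 ((PySem.Set.mem_add v f x).mpr (Or.inl hv))⟩
  · intro hsub
    have h3 : f ∈ U.filter (fun x => x ∉ v) := Finset.mem_filter.mpr ⟨h1, h2⟩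
    have h4 := hsub h3
    simp only [Finset.mem_filter] at h4
    exact h4.2 ((PySem.Set.mem_add v f f).mpr (Or.inr rfl))

-- recurseA only grows the visited set
theorem recurseA_mono (fc : List (String × List String)) :
    ∀ (n : Nat) (l : List String) (v : PySem.Set String) (x : String), x ∈ v →
      x ∈ l.foldl (fun a c => recurseA fc n a c) v := by
  intro n
  induction n with
  | zero =>
    intro l
    induction l with
    | nil => intro v x hx; exact hx
    | cons c cs ih => intro v x hx; exact ih v x hx
  | succ m ihm =>
    intro l
    induction l with
    | nil => intro v x hx; exact hx
    | cons c cs ih =>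
      intro v x hx
      apply ih
      show x ∈ recurseA fc (m + 1) v c
      rw [recurseA]
      split
      · exact hx
      · exact ihm _ _ x ((PySem.Set.mem_add v c x).mpr (Or.inl hx))

theorem recurseA_mono₁ (fc : List (String × List String)) (n : Nat) (v : PySem.Set String)
    (c x : String) (hx : x ∈ v) : x ∈ recurseA fc n v c := by
  simpa using recurseA_mono fc n [c] v x hx

-- running loopB on s then on t is running it on s ++ t
theorem loopB_append (fc : List (String × List String)) (v : PySem.Set String) (s t : List String) :
    loopB fc (loopB fc v s) t = loopB fc v (s ++ t) := by
  fun_induction loopB fc v s with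
  | case1 v => rfl
  | case2 v func rest hmem ih =>
    rw [List.cons_append, loopB]
    simp only [hmem, if_true]
    exact ih
  | case3 v func rest hmem ih =>
    rw [List.cons_append, loopB]
    simp only [hmem, Bool.false_eq_true, if_false]
    rw [← List.append_assoc]
    exact ih

-- folding A's recurse over a stack of U-elements = running B's loop on that stack
theorem foldAux (fc : List (String × List String)) (U : Finset String) (n : Nat)
    (hcore : ∀ (v : PySem.Set String) (f : String), f ∈ U → cnt U v < n →
      recurseA fc n v f = loopB fc v [f]) :
    ∀ (l : List String) (v : PySem.Set String), (∀ x ∈ l, x ∈ U) → cnt U v < n →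
      l.foldl (fun a c => recurseA fc n a c) v = loopB fc v l := by
  intro l
  induction l with
  | nil => intro v _ _; simp [loopB]
  | cons c cs ih =>
    intro v hl hcnt
    have hc : c ∈ U := hl c List.mem_cons_self
    have hrec := hcore v c hc hcnt
    have hmono : ∀ x ∈ v, x ∈ recurseA fc n v c :=
      fun x hx => recurseA_mono₁ fc n v c x hx
    have hcnt' : cnt U (recurseA fc n v c) < n :=
      lt_of_le_of_lt (cnt_mono U v _ hmono) hcnt
    calc (c :: cs).foldl (fun a c => recurseA fc n a c) v
        = cs.foldl (fun a c => recurseA fc n a c) (recurseA fc n v c) := rfl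
      _ = loopB fc (recurseA fc n v c) cs :=
          ih _ (fun x hx => hl x (List.mem_cons_of_mem c hx)) hcnt'
      _ = loopB fc (loopB fc v [c]) cs := by rw [hrec]
      _ = loopB fc v (c :: cs) := loopB_append fc v [c] cs

-- the core bridge: with enough fuel, A's recurse equals B's loop on the singleton stack
theorem core (fc : List (String × List String)) (U : Finset String)
    (hV : ∀ x ∈ fc.flatMap Prod.snd, x ∈ U) :
    ∀ (n : Nat) (v : PySem.Set String) (f : String), f ∈ U → cnt U v < n →
      recurseA fc n v f = loopB fc v [f] := by
  intro n
  induction n with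
  | zero => intro v f _ hcnt; omega
  | succ m ih =>
    intro v f hf hcnt
    rw [recurseA, loopB]
    by_cases hmem : PySem.Set.contains v f = true
    · rw [if_pos hmem, if_pos hmem]
      simp [loopB]
    · rw [if_neg hmem, if_neg hmem, List.append_nil]
      have hcnt' : cnt U (PySem.Set.add v f) < m := by
        have := cnt_add_lt U v f hf (fun hv => hmem (List.contains_iff_mem.mpr hv))
        omega
      have hcallers : ∀ x ∈ (PySem.Dict.mk fc).getD f [], x ∈ U :=
        fun x hx => hV x (mem_getD_flatMap fc f x hx)
      exact foldAux fc U m ih _ _ hcallers hcnt'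

-- ===== VERDICT (by name: the statement is the Claim_ definition above) =====
theorem get_relevant_functions_spec : Claim_equal_get_relevant_functions := by
  intro fc tc _
  show get_relevant_functions fc tc = get_relevant_functions_alt fc tc
  unfold get_relevant_functions get_relevant_functions_alt
  set U : Finset String := (tc ++ fc.flatMap Prod.snd).toFinset with hU
  set N : Nat := (tc ++ fc.flatMap Prod.snd).length + 1 with hN
  have hV : ∀ x ∈ fc.flatMap Prod.snd, x ∈ U := by
    intro x hx; rw [hU]; simp [hx]
  have htc : ∀ x ∈ tc, x ∈ U := by
    intro x hx; rw [hU]; simp [hx]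
  have hcnt0 : cnt U PySem.Set.empty < N := by
    have h1 : cnt U PySem.Set.empty ≤ U.card := Finset.card_filter_le _ _
    have h2 : U.card ≤ (tc ++ fc.flatMap Prod.snd).length := List.toFinset_card_le _
    omega
  exact foldAux fc U N (core fc U hV N) tc PySem.Set.empty htc hcnt0
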